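-- pv_equiv track=rewrite | github.com/alexmeckes/ClawSwitch | router/app.py | _default_tier_attempt_order
-- ===== SOURCE A (Python) =====
-- TIER_ORDER = ("SIMPLE", "MEDIUM", "COMPLEX", "REASONING")
--
-- TIER_RANK = {tier: index for index, tier in enumerate(TIER_ORDER)}
--
-- def _default_tier_attempt_order(selected_tier: str, available_tiers: set[str]) -> list[str]:
--     selected_rank = TIER_RANK[selected_tier]
--     order = [selected_tier]
--
--     # Prefer moving up in capability first, then down if needed.
--     for tier in TIER_ORDER:
--         if tier in available_tiers and TIER_RANK[tier] > selected_rank: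
--             order.append(tier)
--
--     for tier in reversed(TIER_ORDER):
--         if tier in available_tiers and TIER_RANK[tier] < selected_rank:
--             order.append(tier)
--
--     return order
-- ===== SOURCE B (Python) =====
-- TIER_ORDER = ("SIMPLE", "MEDIUM", "COMPLEX", "REASONING")
--
-- TIER_RANK = {tier: index for index, tier in enumerate(TIER_ORDER)}
--
-- def _default_tier_attempt_order(selected_tier: str, available_tiers: set[str]) -> list[str]:
--     # One pass over the input set plus one sort, instead of two directional
--     # scans over TIER_ORDER.  Key: tiers above the selected rank sort first,
--     # ascending (key = rank); tiers below sort after them, descending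
--     # (key = 2*len(TIER_ORDER) - rank, always larger than any rank).
--     sel = TIER_RANK[selected_tier]
--
--     def key(t):
--         r = TIER_RANK[t]
--         return r if r > sel else 2 * len(TIER_ORDER) - r
--
--     return [selected_tier] + sorted(
--         (t for t in available_tiers if t in TIER_RANK and TIER_RANK[t] != sel),
--         key=key,
--     )
-- ===== Notes on version B (the rewrite author's own statement) =====
-- stated objective: alternative
-- what changed: Replaces A's two directional scans over TIER_ORDER (with per-tier membership tests in the input set) by a single filtering pass over the input set followed by one sort under an integer key that places above-selected tiers first ascending and below-selected tiers after descending.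
import Mathlib
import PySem

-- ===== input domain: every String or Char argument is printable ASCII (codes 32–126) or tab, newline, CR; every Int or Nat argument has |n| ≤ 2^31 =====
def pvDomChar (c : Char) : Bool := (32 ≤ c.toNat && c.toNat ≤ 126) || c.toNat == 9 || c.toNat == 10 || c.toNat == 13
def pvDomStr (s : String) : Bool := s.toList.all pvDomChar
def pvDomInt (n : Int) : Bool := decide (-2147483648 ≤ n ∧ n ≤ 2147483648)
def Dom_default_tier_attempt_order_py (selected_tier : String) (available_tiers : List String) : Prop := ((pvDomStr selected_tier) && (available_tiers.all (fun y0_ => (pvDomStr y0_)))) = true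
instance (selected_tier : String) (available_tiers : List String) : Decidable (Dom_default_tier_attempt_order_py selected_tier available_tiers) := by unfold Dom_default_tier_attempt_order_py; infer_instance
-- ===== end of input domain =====

-- B makes a single filtering pass over the input set followed by one key-based sort,
-- instead of A's two directional scans over TIER_ORDER (objective: alternative).

-- ===== PORT A =====
-- TIER_ORDER = ("SIMPLE", "MEDIUM", "COMPLEX", "REASONING")
def pyTIER_ORDER : List String := ["SIMPLE", "MEDIUM", "COMPLEX", "REASONING"]

-- TIER_RANK = {tier: index for index, tier in enumerate(TIER_ORDER)}
def pyTIER_RANK : PySem.Dict String Int :=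
  (PySem.List.enumerate pyTIER_ORDER).foldl (fun d p => d.insert p.2 p.1) PySem.Dict.empty

def default_tier_attempt_order_py (selected_tier : String) (available_tiers : List String) : List String :=
  match pyTIER_RANK.get? selected_tier with
  | none => []  -- KeyError: excluded by Pre_
  | some selected_rank =>
    let order := [selected_tier]
    -- for tier in TIER_ORDER: if tier in available_tiers and TIER_RANK[tier] > selected_rank
    -- (TIER_RANK[tier] never raises here since tier comes from TIER_ORDER: getD is exact)
    let order := pyTIER_ORDER.foldl (fun order tier =>
      if available_tiers.contains tier && decide (pyTIER_RANK.getD tier 0 > selected_rank)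
      then order ++ [tier] else order) order
    -- for tier in reversed(TIER_ORDER): if tier in available_tiers and TIER_RANK[tier] < selected_rank
    let order := pyTIER_ORDER.reverse.foldl (fun order tier =>
      if available_tiers.contains tier && decide (pyTIER_RANK.getD tier 0 < selected_rank)
      then order ++ [tier] else order) order
    order

-- ===== PORT B =====
def default_tier_attempt_order_py_alt (selected_tier : String) (available_tiers : List String) : List String :=
  match pyTIER_RANK.get? selected_tier with
  | none => []  -- KeyError: excluded by Pre_
  | some sel =>
    -- def key(t): r = TIER_RANK[t]; return r if r > sel else 2*len(TIER_ORDER) - r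
    -- (getD is exact here: key is only applied to filtered tiers, which are all in TIER_RANK)
    let key : String → Int := fun t =>
      let r := pyTIER_RANK.getD t 0
      if r > sel then r else 2 * 4 - r
    -- [selected_tier] + sorted((t for t in available_tiers if t in TIER_RANK and TIER_RANK[t] != sel), key=key)
    selected_tier :: PySem.List.sorted
      (available_tiers.filter (fun t =>
        (pyTIER_RANK.get? t).isSome && pyTIER_RANK.getD t 0 != sel))
      key false

-- ===== PRECONDITION & SPEC =====
-- Pre_ excludes exactly the inputs where A raises KeyError (selected_tier not a known tier);
-- Nodup is the representation invariant of the Python set parameter (set[str] -> list of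
-- DISTINCT elements), so it excludes no Python input.
def Pre_default_tier_attempt_order_py (selected_tier : String) (available_tiers : List String) : Prop :=
  selected_tier ∈ (["SIMPLE", "MEDIUM", "COMPLEX", "REASONING"] : List String) ∧
  available_tiers.Nodup
instance (selected_tier : String) (available_tiers : List String) : Decidable (Pre_default_tier_attempt_order_py selected_tier available_tiers) := by unfold Pre_default_tier_attempt_order_py; infer_instance

def pvWitness_default_tier_attempt_order_py : String × List String := ("MEDIUM", ["SIMPLE", "REASONING"])

def Spec_default_tier_attempt_order_py (selected_tier : String) (available_tiers : List String) (out : List String) : Prop := out = default_tier_attempt_order_py_alt selected_tier available_tiers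
instance (selected_tier : String) (available_tiers : List String) (out : List String) : Decidable (Spec_default_tier_attempt_order_py selected_tier available_tiers out) := by unfold Spec_default_tier_attempt_order_py; infer_instance

-- ===== CLAIM (what is proved, stated in full; the proofs are below) =====
def Claim_equal_default_tier_attempt_order_py : Prop := ∀ (selected_tier : String) (available_tiers : List String), Dom_default_tier_attempt_order_py selected_tier available_tiers → Pre_default_tier_attempt_order_py selected_tier available_tiers → Spec_default_tier_attempt_order_py selected_tier available_tiers (default_tier_attempt_order_py selected_tier available_tiers)

-- ===== LEMMAS AND PROOFS =====
theorem pv_rank_eq : pyTIER_RANK = PySem.Dict.mk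
    [("SIMPLE", 0), ("MEDIUM", 1), ("COMPLEX", 2), ("REASONING", 3)] := by decide

theorem pv_get_char (t : String) : pyTIER_RANK.get? t =
    if t = "SIMPLE" then some 0 else if t = "MEDIUM" then some 1
    else if t = "COMPLEX" then some 2 else if t = "REASONING" then some 3 else none := by
  by_cases h1 : t = "SIMPLE"
  · subst h1; decide
  by_cases h2 : t = "MEDIUM"
  · subst h2; decide
  by_cases h3 : t = "COMPLEX"
  · subst h3; decide
  by_cases h4 : t = "REASONING"
  · subst h4; decide
  have b1 : ("SIMPLE" == t) = false := beq_eq_false_iff_ne.mpr (fun h => h1 h.symm)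
  have b2 : ("MEDIUM" == t) = false := beq_eq_false_iff_ne.mpr (fun h => h2 h.symm)
  have b3 : ("COMPLEX" == t) = false := beq_eq_false_iff_ne.mpr (fun h => h3 h.symm)
  have b4 : ("REASONING" == t) = false := beq_eq_false_iff_ne.mpr (fun h => h4 h.symm)
  rw [pv_rank_eq, PySem.Dict.get?_mk_cons, PySem.Dict.get?_mk_cons, PySem.Dict.get?_mk_cons,
    PySem.Dict.get?_mk_cons]
  simp [b1, b2, b3, b4, h1, h2, h3, h4, PySem.Dict.get?]

theorem pv_getD_char (t : String) : pyTIER_RANK.getD t 0 = (pyTIER_RANK.get? t).getD 0 := rfl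

-- sorted(filter p av, key) is the canonical candidate list filtered by membership in av
theorem pv_sorted_eq (cand : List String) (key : String → Int) (p : String → Bool)
    (av : List String) (hnd : av.Nodup) (hcnd : cand.Nodup)
    (hmem : ∀ t, p t = true ↔ t ∈ cand)
    (hpair : cand.Pairwise (fun a b => key a < key b)) :
    PySem.List.sorted (av.filter p) key false = cand.filter (fun t => av.contains t) := by
  apply PySem.List.sorted_eq_of_perm_of_pairwise_lt
  · rw [List.perm_ext_iff_of_nodup (hcnd.filter _) (hnd.filter _)]
    intro t
    simp only [List.mem_filter, List.contains_eq_mem, decide_eq_true_eq, hmem]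
    tauto
  · exact hpair.filter _

theorem pv_case (sel : Int) (cand : List String)
    (hsel : sel = 0 ∧ cand = ["MEDIUM", "COMPLEX", "REASONING"] ∨
            sel = 1 ∧ cand = ["COMPLEX", "REASONING", "SIMPLE"] ∨
            sel = 2 ∧ cand = ["REASONING", "MEDIUM", "SIMPLE"] ∨
            sel = 3 ∧ cand = ["COMPLEX", "MEDIUM", "SIMPLE"])
    (av : List String) (hnd : av.Nodup) :
    PySem.List.sorted
      (av.filter (fun t => (pyTIER_RANK.get? t).isSome && pyTIER_RANK.getD t 0 != sel))
      (fun t => if sel < pyTIER_RANK.getD t 0 then pyTIER_RANK.getD t 0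
                else 8 - pyTIER_RANK.getD t 0) false
    = cand.filter (fun t => av.contains t) := by
  apply pv_sorted_eq _ _ _ _ hnd
  · rcases hsel with ⟨_, h⟩ | ⟨_, h⟩ | ⟨_, h⟩ | ⟨_, h⟩ <;> subst h <;> decide
  · intro t
    rcases hsel with ⟨h, hc⟩ | ⟨h, hc⟩ | ⟨h, hc⟩ | ⟨h, hc⟩ <;> subst h <;> subst hc <;>
      · rw [Bool.and_eq_true, pv_getD_char, pv_get_char t]
        split_ifs <;> simp_all
  · rcases hsel with ⟨h, hc⟩ | ⟨h, hc⟩ | ⟨h, hc⟩ | ⟨h, hc⟩ <;> subst h <;> subst hc <;> decide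

-- ===== VERDICT (by name: the statement is the Claim_ definition above) =====
theorem default_tier_attempt_order_py_spec : Claim_equal_default_tier_attempt_order_py := by
  intro selected_tier available_tiers _ hpre
  obtain ⟨hsel, hnd⟩ := hpre
  unfold Spec_default_tier_attempt_order_py
  unfold default_tier_attempt_order_py default_tier_attempt_order_py_alt
  fin_cases hsel
  · have hc := pv_case 0 ["MEDIUM", "COMPLEX", "REASONING"] (Or.inl ⟨rfl, rfl⟩) available_tiers hnd
    by_cases h2 : "MEDIUM" ∈ available_tiers <;>
    by_cases h3 : "COMPLEX" ∈ available_tiers <;>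
    by_cases h4 : "REASONING" ∈ available_tiers <;>
      simp [pyTIER_ORDER, show pyTIER_RANK.get? "SIMPLE" = some 0 from rfl, hc, h2, h3, h4,
        show pyTIER_RANK.getD "SIMPLE" 0 = 0 from rfl, show pyTIER_RANK.getD "MEDIUM" 0 = 1 from rfl,
        show pyTIER_RANK.getD "COMPLEX" 0 = 2 from rfl, show pyTIER_RANK.getD "REASONING" 0 = 3 from rfl]
  · have hc := pv_case 1 ["COMPLEX", "REASONING", "SIMPLE"] (Or.inr (Or.inl ⟨rfl, rfl⟩)) available_tiers hnd
    by_cases h1 : "SIMPLE" ∈ available_tiers <;>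
    by_cases h3 : "COMPLEX" ∈ available_tiers <;>
    by_cases h4 : "REASONING" ∈ available_tiers <;>
      simp [pyTIER_ORDER, show pyTIER_RANK.get? "MEDIUM" = some 1 from rfl, hc, h1, h3, h4,
        show pyTIER_RANK.getD "SIMPLE" 0 = 0 from rfl, show pyTIER_RANK.getD "MEDIUM" 0 = 1 from rfl,
        show pyTIER_RANK.getD "COMPLEX" 0 = 2 from rfl, show pyTIER_RANK.getD "REASONING" 0 = 3 from rfl]
  · have hc := pv_case 2 ["REASONING", "MEDIUM", "SIMPLE"] (Or.inr (Or.inr (Or.inl ⟨rfl, rfl⟩))) available_tiers hnd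
    by_cases h1 : "SIMPLE" ∈ available_tiers <;>
    by_cases h2 : "MEDIUM" ∈ available_tiers <;>
    by_cases h4 : "REASONING" ∈ available_tiers <;>
      simp [pyTIER_ORDER, show pyTIER_RANK.get? "COMPLEX" = some 2 from rfl, hc, h1, h2, h4,
        show pyTIER_RANK.getD "SIMPLE" 0 = 0 from rfl, show pyTIER_RANK.getD "MEDIUM" 0 = 1 from rfl,
        show pyTIER_RANK.getD "COMPLEX" 0 = 2 from rfl, show pyTIER_RANK.getD "REASONING" 0 = 3 from rfl]
  · have hc := pv_case 3 ["COMPLEX", "MEDIUM", "SIMPLE"] (Or.inr (Or.inr (Or.inr ⟨rfl, rfl⟩))) available_tiers hnd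
    by_cases h1 : "SIMPLE" ∈ available_tiers <;>
    by_cases h2 : "MEDIUM" ∈ available_tiers <;>
    by_cases h3 : "COMPLEX" ∈ available_tiers <;>
      simp [pyTIER_ORDER, show pyTIER_RANK.get? "REASONING" = some 3 from rfl, hc, h1, h2, h3,
        show pyTIER_RANK.getD "SIMPLE" 0 = 0 from rfl, show pyTIER_RANK.getD "MEDIUM" 0 = 1 from rfl,
        show pyTIER_RANK.getD "COMPLEX" 0 = 2 from rfl, show pyTIER_RANK.getD "REASONING" 0 = 3 from rfl]
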